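-- pv_equiv track=rewrite | github.com/MagdalenaOkuniewska/Project_Cipher | cipher.py | perform_shift
-- ===== SOURCE A (Python) =====
-- def perform_shift(text: str, shift: int) -> str:
--     """Calculate shift for text according to ROT47 cipher.
--     Works on ASCII characters from '!' (33) to '~' (126)."""
--
--     rot47_txt = ""
--
--     for char in text:
--         if 33 <= ord(char) <= 126:
--             char_position = (ord(char) - 33 + shift) % 94
--             shifted_char = chr(char_position + 33)
--             rot47_txt += shifted_char
--         else:
--             rot47_txt += char
--     return rot47_txt
-- ===== SOURCE B (Python) =====
-- def perform_shift(text: str, shift: int) -> str: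
--     printable = "".join(map(chr, range(33, 127)))
--     k = shift % 94
--     rotated = printable[k:] + printable[:k]
--     return text.translate(str.maketrans(printable, rotated))
-- ===== Notes on version B (the rewrite author's own statement) =====
-- stated objective: idiomatic
-- what changed: B does the modular arithmetic only once: it computes k = shift % 94, rotates the printable alphabet by slicing (printable[k:] + printable[:k]), and returns text.translate(str.maketrans(printable, rotated)), so no per-character shift formula, branch or accumulator loop remains.
import Mathlib
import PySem

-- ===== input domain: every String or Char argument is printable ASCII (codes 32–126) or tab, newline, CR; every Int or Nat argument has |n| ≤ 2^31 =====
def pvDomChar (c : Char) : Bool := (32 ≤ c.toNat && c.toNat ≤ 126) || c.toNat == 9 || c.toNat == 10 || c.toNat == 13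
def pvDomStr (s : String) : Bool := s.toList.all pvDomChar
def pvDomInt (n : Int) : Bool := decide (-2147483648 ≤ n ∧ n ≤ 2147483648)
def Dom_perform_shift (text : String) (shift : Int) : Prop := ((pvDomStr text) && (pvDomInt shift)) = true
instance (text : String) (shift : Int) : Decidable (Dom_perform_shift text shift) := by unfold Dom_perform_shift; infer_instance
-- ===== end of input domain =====

-- B replaces A's per-character modular arithmetic by one rotation of the printable alphabet
-- (slicing at k = shift % 94) and a maketrans/translate-style table lookup (idiomatic; measured faster in a timing run).

-- ===== PORT A =====
-- A: loop over the characters, branching on printability, computing (ord(c)-33+shift)%94 per char,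
-- appending to an accumulator string.
def perform_shift (text : String) (shift : Int) : String :=
  String.ofList (text.toList.foldl (fun acc c =>
    if 33 ≤ (c.toNat : Int) ∧ (c.toNat : Int) ≤ 126 then
      acc ++ [Char.ofNat ((PySem.Int.mod ((c.toNat : Int) - 33 + shift) 94) + 33).toNat]
    else acc ++ [c]) [])

-- ===== PORT B =====
-- printable = "".join(map(chr, range(33, 127)))
def psPrintable : List Char := (PySem.List.pyRange 33 127 1).map (fun i => Char.ofNat i.toNat)

-- rotated = printable[k:] + printable[:k] with k = shift % 94; str.maketrans(printable, rotated)
-- builds the translation dict by pairing the two strings position by position.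
def psTable (shift : Int) : PySem.Dict Char Char :=
  (psPrintable.zip
      (PySem.List.slice psPrintable (some (PySem.Int.mod shift 94)) none ++
       PySem.List.slice psPrintable none (some (PySem.Int.mod shift 94)))).foldl
    (fun d p => d.insert p.1 p.2) PySem.Dict.empty

-- text.translate(table): each char is looked up, unmapped chars pass through.
def perform_shift_alt (text : String) (shift : Int) : String :=
  String.ofList (text.toList.map (fun c => (psTable shift).getD c c))

-- ===== PRECONDITION & SPEC =====
def Spec_perform_shift (text : String) (shift : Int) (out : String) : Prop := out = perform_shift_alt text shift
instance (text : String) (shift : Int) (out : String) : Decidable (Spec_perform_shift text shift out) := by unfold Spec_perform_shift; infer_instance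

-- ===== CLAIM (what is proved, stated in full; the proofs are below) =====
def Claim_equal_perform_shift : Prop := ∀ (text : String) (shift : Int), Dom_perform_shift text shift → Spec_perform_shift text shift (perform_shift text shift)

-- ===== LEMMAS AND PROOFS =====

-- shorthand for A's shifted character of code n, used only by the proofs
def valC (shift : Int) (n : Nat) : Char :=
  Char.ofNat ((PySem.Int.mod ((n : Int) - 33 + shift) 94) + 33).toNat

-- the printable alphabet as a range, used only by the proofs
def pChars : List Char := (List.range' 33 94).map Char.ofNat

theorem psPrintable_eq : psPrintable = pChars := by decide

theorem toNat_ofNat_small (n : Nat) (h : n < 127) : (Char.ofNat n).toNat = n := by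
  have hv : n.isValidChar := Or.inl (by omega)
  rw [Char.ofNat, dif_pos hv]
  simp [Char.ofNatAux, Char.toNat, UInt32.toNat_ofNatLT]

-- the rotated alphabet zipped with the alphabet lists each code n against chr(33+(n-33+k)%94)
theorem zip_rot (k : Nat) (hk : k < 94) :
    pChars.zip (pChars.drop k ++ pChars.take k) =
      (List.range' 33 94).map (fun n => (Char.ofNat n, Char.ofNat (33 + (n - 33 + k) % 94))) := by
  have hlen : pChars.length = 94 := by simp [pChars]
  apply List.ext_getElem
  · simp [pChars]; omega
  · intro j h1 h2
    have hj : j < 94 := by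
      simp [pChars] at h1
      omega
    rw [List.getElem_zip, List.getElem_map, List.getElem_range']
    have hdrop : (pChars.drop k).length = 94 - k := by simp [hlen]
    have hP : ∀ (i : Nat) (hi : i < 94), pChars[i]'(by omega) = Char.ofNat (33 + i) := by
      intro i hi
      simp [pChars, List.getElem_range']
    refine Prod.ext ?_ ?_
    · simp [hP j hj]
    · simp only
      by_cases hc : j < 94 - k
      · rw [List.getElem_append_left (by omega), List.getElem_drop, hP (k + j) (by omega)]
        congr 1
        omega
      · rw [List.getElem_append_right (by omega)]
        rw [List.getElem_take, hP (j - (pChars.drop k).length) (by omega)]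
        congr 1
        rw [hdrop]
        omega

-- A's formula as a function of k = shift % 94
theorem valC_eq (shift : Int) (n : Nat) (h33 : 33 ≤ n) (h : n < 127) :
    valC shift n = Char.ofNat (33 + (n - 33 + (PySem.Int.mod shift 94).toNat) % 94) := by
  unfold valC
  rw [PySem.Int.mod_eq_emod_of_pos (by omega), PySem.Int.mod_eq_emod_of_pos (by omega)]
  congr 1
  omega

theorem k_lt (shift : Int) : (PySem.Int.mod shift 94).toNat < 94 := by
  rw [PySem.Int.mod_eq_emod_of_pos (by omega)]
  omega

theorem k_nonneg (shift : Int) : 0 ≤ PySem.Int.mod shift 94 := by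
  rw [PySem.Int.mod_eq_emod_of_pos (by omega)]
  omega

-- B's table is exactly the association list pairing each printable code with A's shifted char
theorem table_items (shift : Int) :
    (psTable shift).items = (List.range' 33 94).map (fun n => (Char.ofNat n, valC shift n)) := by
  unfold psTable
  rw [psPrintable_eq, PySem.List.slice_from _ (k_nonneg shift),
      PySem.List.slice_to _ (k_nonneg shift),
      zip_rot _ (k_lt shift)]
  have hv : ((List.range' 33 94).map
        (fun n => (Char.ofNat n, Char.ofNat (33 + (n - 33 + (PySem.Int.mod shift 94).toNat) % 94)))) =
      ((List.range' 33 94).map (fun n => (Char.ofNat n, valC shift n))) := by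
    apply List.map_congr_left
    intro n hn
    have := List.mem_range'_1.mp hn
    rw [valC_eq shift n (by omega) (by omega)]
  rw [hv, List.foldl_map]
  rw [PySem.Dict.items_foldl_insert_fresh]
  · rw [show PySem.Dict.empty.items = ([] : List (Char × Char)) from rfl, List.nil_append]
  · intro a _; simp
  · refine (List.nodup_range' (step := 1)).map_on ?_
    intro a ha b hb hab
    have ha' : a < 127 := by have := List.mem_range'_1.mp ha; omega
    have hb' : b < 127 := by have := List.mem_range'_1.mp hb; omega
    have h2 := congrArg Char.toNat hab
    rwa [toNat_ofNat_small _ ha', toNat_ofNat_small _ hb'] at h2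

-- lookup in an association list keyed by chr(n) over small codes n
theorem get?_map_list (shift : Int) (l : List Nat) (c : Char) (hl : ∀ n ∈ l, n < 127) :
    PySem.Dict.get? ⟨l.map (fun n => (Char.ofNat n, valC shift n))⟩ c =
      if c.toNat ∈ l then some (valC shift c.toNat) else none := by
  induction l with
  | nil => simp [PySem.Dict.get?]
  | cons n t ih =>
    have hn : n < 127 := hl n (by simp)
    rw [List.map_cons, PySem.Dict.get?_mk_cons]
    by_cases h : c.toNat = n
    · have hk : Char.ofNat n = c := by rw [← h]; exact Char.ofNat_toNat c
      simp [hk, h]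
    · have hk : (Char.ofNat n == c) = false := by
        apply beq_false_of_ne
        intro he
        exact h (((congrArg Char.toNat he).symm.trans (toNat_ofNat_small _ hn)).symm).symm
      rw [hk]
      simp only [Bool.false_eq_true, if_false]
      rw [ih (fun m hm => hl m (by simp [hm]))]
      simp [List.mem_cons, h]

-- B's table lookup computes exactly A's branch for every character the domain admits
theorem table_getD (shift : Int) (c : Char) (hc : c.toNat < 127) :
    (psTable shift).getD c c =
      if 33 ≤ (c.toNat : Int) ∧ (c.toNat : Int) ≤ 126 then valC shift c.toNat else c := by
  have htab : psTable shift =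
      PySem.Dict.mk ((List.range' 33 94).map fun n => (Char.ofNat n, valC shift n)) := by
    apply PySem.Dict.ext
    rw [table_items]
  rw [htab, PySem.Dict.getD_eq_get?_getD,
    get?_map_list shift _ c (fun n hn => by have := List.mem_range'_1.mp hn; omega)]
  have hcond : (c.toNat ∈ List.range' 33 94) ↔ (33 ≤ (c.toNat : Int) ∧ (c.toNat : Int) ≤ 126) := by
    rw [List.mem_range'_1]; omega
  by_cases h : 33 ≤ (c.toNat : Int) ∧ (c.toNat : Int) ≤ 126
  · rw [if_pos (hcond.mpr h), if_pos h]; rfl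
  · rw [if_neg (fun hm => h (hcond.mp hm)), if_neg h]; rfl

-- ===== VERDICT (by name: the statement is the Claim_ definition above) =====
theorem perform_shift_spec : Claim_equal_perform_shift := by
  intro text shift hdom
  have hchars : ∀ c ∈ text.toList, c.toNat < 127 := by
    intro c hc
    have h1 : pvDomStr text = true := ((Bool.and_eq_true _ _).mp hdom).1
    have h2 : pvDomChar c = true := (List.all_eq_true.mp h1) c hc
    unfold pvDomChar at h2
    simp only [Bool.or_eq_true, Bool.and_eq_true, decide_eq_true_eq, beq_iff_eq] at h2
    omega
  unfold Spec_perform_shift perform_shift perform_shift_alt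
  congr 1
  have hfun : (fun (acc : List Char) c =>
      if 33 ≤ (c.toNat : Int) ∧ (c.toNat : Int) ≤ 126 then
        acc ++ [Char.ofNat ((PySem.Int.mod ((c.toNat : Int) - 33 + shift) 94) + 33).toNat]
      else acc ++ [c]) =
      (fun (acc : List Char) c =>
        acc ++ [if 33 ≤ (c.toNat : Int) ∧ (c.toNat : Int) ≤ 126 then valC shift c.toNat else c]) := by
    funext acc c
    split <;> rfl
  rw [hfun, PySem.List.foldl_append_singleton_eq_map, List.nil_append]
  apply List.map_congr_left
  intro c hc
  rw [table_getD shift c (hchars c hc)]
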